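-- pv_equiv track=rewrite | github.com/pbrito10/industrial-task-recognition | src/tracking/order_matching.py | matches_order
-- ===== SOURCE A (Python) =====
-- def matches_order(actual: list[str], expected: list[str]) -> bool:
--     """Verifica se a sequência real respeita a ordem esperada.
--
--     Permite repetições consecutivas da mesma zona, mas não permite saltar zonas
--     nem visitá-las fora de ordem.
--     """
--     if not expected:
--         return True
--     if not actual:
--         return False
--
--     ptr = 0
--     entered_current = False
--
--     for zone in actual:
--         if zone == expected[ptr]:
--             entered_current = True
--             continue
--         if entered_current and ptr + 1 < len(expected) and zone == expected[ptr + 1]: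
--             ptr += 1
--             entered_current = True
--             continue
--         return False
--
--     return entered_current and ptr == len(expected) - 1
-- ===== SOURCE B (Python) =====
-- def matches_order(actual: list[str], expected: list[str]) -> bool:
--     """Verifica se a sequencia real respeita a ordem esperada (build-then-compare)."""
--     if not expected:
--         return True
--     runs = []
--     for zone in actual:
--         if not runs or runs[-1] != zone:
--             runs.append(zone)
--     return runs == expected
-- ===== Notes on version B (the rewrite author's own statement) =====
-- stated objective: simpler
-- what changed: Replaces the pointer+entered-flag state machine with a build-then-compare decomposition: compress consecutive duplicate zones of actual into runs and test runs == expected (keeping the empty-expected guard).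
import Mathlib
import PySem

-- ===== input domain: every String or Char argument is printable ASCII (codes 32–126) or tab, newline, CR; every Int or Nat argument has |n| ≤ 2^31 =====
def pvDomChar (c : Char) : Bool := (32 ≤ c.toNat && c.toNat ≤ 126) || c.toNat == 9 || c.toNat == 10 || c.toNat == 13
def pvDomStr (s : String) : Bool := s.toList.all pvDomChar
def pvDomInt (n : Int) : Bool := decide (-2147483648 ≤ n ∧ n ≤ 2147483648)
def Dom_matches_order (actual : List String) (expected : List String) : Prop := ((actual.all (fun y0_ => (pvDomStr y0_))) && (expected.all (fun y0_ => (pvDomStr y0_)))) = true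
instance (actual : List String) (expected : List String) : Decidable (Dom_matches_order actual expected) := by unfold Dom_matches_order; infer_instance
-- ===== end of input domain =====

-- B replaces A's pointer+flag state machine by compressing consecutive duplicate zones and comparing with expected (simpler decomposition, same cost).


-- ===== PORT A =====
-- the for-loop with early return, state (ptr, entered_current)
def pvLoopA (expected : List String) : List String → Int → Bool → Bool
  | [], ptr, entered => entered && (ptr == (expected.length : Int) - 1)
  | zone :: rest, ptr, entered =>
    if PySem.List.pyGet? expected ptr == some zone then
      pvLoopA expected rest ptr true
    else if entered && decide (ptr + 1 < (expected.length : Int))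
            && (PySem.List.pyGet? expected (ptr + 1) == some zone) then
      pvLoopA expected rest (ptr + 1) true
    else
      false

def matches_order (actual : List String) (expected : List String) : Bool :=
  if expected == [] then true
  else if actual == [] then false
  else pvLoopA expected actual 0 false

-- ===== PORT B =====
def matches_order_alt (actual : List String) (expected : List String) : Bool :=
  if expected == [] then true
  else
    let runs := actual.foldl
      (fun runs zone =>
        if runs == [] || !(PySem.List.pyGet? runs (-1) == some zone) then runs ++ [zone]
        else runs) []
    runs == expected

-- ===== PRECONDITION & SPEC =====
def Spec_matches_order (actual : List String) (expected : List String) (out : Bool) : Prop := out = matches_order_alt actual expected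
instance (actual : List String) (expected : List String) (out : Bool) : Decidable (Spec_matches_order actual expected out) := by unfold Spec_matches_order; infer_instance

-- ===== CLAIM (what is proved, stated in full; the proofs are below) =====
def Claim_equal_matches_order : Prop := ∀ (actual : List String) (expected : List String), Dom_matches_order actual expected → Spec_matches_order actual expected (matches_order actual expected)

-- ===== LEMMAS AND PROOFS =====

-- the compressed (run-length-erased) tail of a list, given the previously kept element p
def pvCompressFrom (p : String) : List String → List String
  | [] => []
  | x :: xs => if x == p then pvCompressFrom p xs else x :: pvCompressFrom x xs

theorem pvFoldB_eq (l : List String) : ∀ (acc : List String) (p : String),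
    acc ≠ [] → acc.getLast? = some p →
    l.foldl (fun runs zone =>
        if runs == [] || !(PySem.List.pyGet? runs (-1) == some zone) then runs ++ [zone]
        else runs) acc = acc ++ pvCompressFrom p l := by
  induction l with
  | nil => intro acc p _ _; simp [pvCompressFrom]
  | cons z rest ih =>
    intro acc p hne hlast
    have hacc : (acc == []) = false := by simp [hne]
    by_cases hz : z = p
    · subst hz
      have hstep : (if acc == [] || !(PySem.List.pyGet? acc (-1) == some z)
          then acc ++ [z] else acc) = acc := by
        simp [PySem.List.pyGet?_neg_one, hlast, hacc]
      rw [List.foldl_cons, hstep, ih acc z hne hlast]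
      simp [pvCompressFrom]
    · have hstep : (if acc == [] || !(PySem.List.pyGet? acc (-1) == some z)
          then acc ++ [z] else acc) = acc ++ [z] := by
        simp [PySem.List.pyGet?_neg_one, hlast, hacc, Ne.symm hz]
      rw [List.foldl_cons, hstep, ih (acc ++ [z]) z (by simp) (by simp)]
      simp [pvCompressFrom, hz]

theorem pvLoopA_eq (expected : List String) (l : List String) :
    ∀ (n : Nat) (hn : n < expected.length),
    pvLoopA expected l (n : Int) true
      = decide (pvCompressFrom expected[n] l = expected.drop (n + 1)) := by
  induction l with
  | nil =>
    intro n hn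
    simp only [pvLoopA, Bool.true_and]
    rcases Nat.lt_or_ge (n + 1) expected.length with h | h
    · have hd : expected.drop (n + 1) ≠ [] := by
        simp [List.drop_eq_nil_iff]; omega
      simp [pvCompressFrom, hd, show ¬ ((n : Int) = (expected.length : Int) - 1) by omega]
    · have hd : expected.drop (n + 1) = [] := by
        simp [List.drop_eq_nil_iff]; omega
      simp [pvCompressFrom, hd, show (n : Int) = (expected.length : Int) - 1 by omega]
  | cons z rest ih =>
    intro n hn
    have hget : PySem.List.pyGet? expected (n : Int) = some expected[n] := by
      simp [PySem.List.pyGet?_natCast, List.getElem?_eq_getElem hn]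
    by_cases hz : z = expected[n]
    · -- stay on the current zone
      rw [show pvLoopA expected (z :: rest) (n : Int) true = pvLoopA expected rest (n : Int) true
            from by simp [pvLoopA, hget, hz]]
      rw [ih n hn]
      simp [pvCompressFrom, hz]
    · have hz' : (z == expected[n]) = false := by simp [hz]
      have hne : (some expected[n] == some z) = false := by simp [Ne.symm hz]
      have hC : pvCompressFrom expected[n] (z :: rest) = z :: pvCompressFrom z rest := by
        simp [pvCompressFrom, hz']
      rcases Nat.lt_or_ge (n + 1) expected.length with h | h
      · have hget1 : PySem.List.pyGet? expected ((n : Int) + 1) = some expected[n+1] := by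
          rw [show ((n : Int) + 1) = ((n + 1 : Nat) : Int) from by push_cast; ring,
            PySem.List.pyGet?_natCast]
          exact List.getElem?_eq_getElem h
        have hdrop : expected.drop (n + 1) = expected[n+1] :: expected.drop (n + 2) :=
          List.drop_eq_getElem_cons h
        have hlt : ((n : Int) + 1 < (expected.length : Int)) := by omega
        by_cases hz1 : z = expected[n+1]
        · -- advance the pointer
          have ht1 : (PySem.List.pyGet? expected ((n : Int) + 1) == some z) = true := by
            rw [hget1]; simp [hz1]
          rw [show pvLoopA expected (z :: rest) (n : Int) true
                = pvLoopA expected rest ((n : Int) + 1) true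
              from by simp [pvLoopA, hget, hne, ht1, hlt]]
          rw [show ((n : Int) + 1) = ((n + 1 : Nat) : Int) from by push_cast; ring,
            ih (n + 1) h, hC, hdrop, hz1]
          exact decide_eq_decide.mpr (by simp only [List.cons.injEq, true_and])
        · -- mismatch: A returns False, and the compressed head differs from expected[n+1]
          have hne1 : (some expected[n+1] == some z) = false := by simp [Ne.symm hz1]
          rw [show pvLoopA expected (z :: rest) (n : Int) true = false
              from by simp [pvLoopA, hget, hne, hget1, hne1], hC, hdrop]
          exact (decide_eq_false (by intro heq; injection heq with h1 _; exact hz1 h1)).symm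
      · -- expected exhausted: A returns False, drop (n+1) is empty, the compressed list is not
        have hdrop : expected.drop (n + 1) = [] := by simp [List.drop_eq_nil_iff]; omega
        have hlt : ¬ ((n : Int) + 1 < (expected.length : Int)) := by omega
        rw [show pvLoopA expected (z :: rest) (n : Int) true = false
            from by simp [pvLoopA, hget, hne, hlt], hC, hdrop]
        simp

-- ===== VERDICT (by name: the statement is the Claim_ definition above) =====
theorem matches_order_spec : Claim_equal_matches_order := by
  intro actual expected _
  unfold Spec_matches_order matches_order matches_order_alt
  rcases expected with _ | ⟨e, es⟩
  · simp
  · rw [if_neg (by simp)]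
    rcases actual with _ | ⟨z, zs⟩
    · simp
    · rw [if_neg (by simp), if_neg (by simp)]
      have hB : (z :: zs).foldl
          (fun runs zone =>
            if runs == [] || !(PySem.List.pyGet? runs (-1) == some zone) then runs ++ [zone]
            else runs) [] = z :: pvCompressFrom z zs := by
        rw [List.foldl_cons,
          show (if ([] : List String) == [] || !(PySem.List.pyGet? ([] : List String) (-1) == some z)
              then ([] : List String) ++ [z] else []) = [z] from by simp]
        exact pvFoldB_eq zs [z] z (by simp) (by simp)
      rw [hB]
      by_cases hz : z = e
      · subst hz
        rw [show pvLoopA (z :: es) (z :: zs) 0 false = pvLoopA (z :: es) zs 0 true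
              from by simp [pvLoopA]]
        rw [show (0 : Int) = ((0 : Nat) : Int) from by simp,
          pvLoopA_eq (z :: es) zs 0 (by simp)]
        by_cases hx : pvCompressFrom z zs = es <;> simp [hx]
      · rw [show pvLoopA (e :: es) (z :: zs) 0 false = false
            from by simp [pvLoopA, Ne.symm hz]]
        simp [hz]
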